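-- pv_equiv track=rewrite | github.com/tamentis/openscrolls | daggerfall/books.py | create_markup
-- ===== SOURCE A (Python) =====
-- def create_markup(buf):
--     markup = "<Page RawSize=\"%d\">" % len(buf)
--     skip = 0
--     for i, c in enumerate(buf):
--         if skip > 0:
--             skip -= 1
--             continue
--
--         if c >= 0x20 and c <= 0x7F:
--             markup += chr(c)
--         elif c == 0x00:
--             markup += "<NOP />"
--         elif c == 0xFC:
--             markup += "<StartJustify />"
--             if buf[i+1] == 0x00:
--                 skip += 1
--                 markup += "<EndOfLine />\n"
--         elif c == 0xFD:
--             markup += "<CenterPreceeding />"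
--             if buf[i+1] == 0x00:
--                 skip += 1
--                 markup += "<EndOfLine />\n"
--         elif c == 0xF9:
--             font_type = buf[i+1]
--             markup += "<Font Style=\"%d\">" % font_type
--             skip += 1
--         elif c == 0xF6:
--             markup += "<EndOfPage />"
--             break
--         else:
--             markup += "<UNKNOWN: %02X>" % c
--     markup += "</Page>"
--
--     return markup
-- ===== SOURCE B (Python) =====
-- def create_markup(buf):
--     # Staged design: a tokenizer yields an intermediate token stream
--     # (kind, value), and a separate renderer maps tokens to markup.
--     def _tokens(buf):
--         i, n = 0, len(buf)
--         while i < n: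
--             c = buf[i]
--             if 0x20 <= c <= 0x7F:
--                 yield ("txt", c)
--                 i += 1
--             elif c == 0x00:
--                 yield ("nop", 0)
--                 i += 1
--             elif c == 0xFC or c == 0xFD:
--                 eol = buf[i + 1] == 0x00
--                 yield ("just" if c == 0xFC else "ctr", 1 if eol else 0)
--                 i += 2 if eol else 1
--             elif c == 0xF9:
--                 yield ("font", buf[i + 1])
--                 i += 2
--             elif c == 0xF6:
--                 yield ("eop", 0)
--                 return
--             else:
--                 yield ("unk", c)
--                 i += 1
--
--     def _render(tok):
--         kind, v = tok
--         if kind == "txt":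
--             return chr(v)
--         if kind == "nop":
--             return "<NOP />"
--         if kind == "just":
--             return "<StartJustify />" + ("<EndOfLine />\n" if v else "")
--         if kind == "ctr":
--             return "<CenterPreceeding />" + ("<EndOfLine />\n" if v else "")
--         if kind == "font":
--             return '<Font Style="%d">' % v
--         if kind == "eop":
--             return "<EndOfPage />"
--         return "<UNKNOWN: %02X>" % v
--
--     return ('<Page RawSize="%d">' % len(buf)
--             + "".join(map(_render, _tokens(buf)))
--             + "</Page>")
-- ===== Notes on version B (the rewrite author's own statement) =====
-- stated objective: alternative
-- what changed: Splits A's single accumulating scan into two stages: a tokenizer that produces an intermediate (kind, value) token stream, and a separate renderer mapped over the tokens and joined once.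
import Mathlib
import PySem

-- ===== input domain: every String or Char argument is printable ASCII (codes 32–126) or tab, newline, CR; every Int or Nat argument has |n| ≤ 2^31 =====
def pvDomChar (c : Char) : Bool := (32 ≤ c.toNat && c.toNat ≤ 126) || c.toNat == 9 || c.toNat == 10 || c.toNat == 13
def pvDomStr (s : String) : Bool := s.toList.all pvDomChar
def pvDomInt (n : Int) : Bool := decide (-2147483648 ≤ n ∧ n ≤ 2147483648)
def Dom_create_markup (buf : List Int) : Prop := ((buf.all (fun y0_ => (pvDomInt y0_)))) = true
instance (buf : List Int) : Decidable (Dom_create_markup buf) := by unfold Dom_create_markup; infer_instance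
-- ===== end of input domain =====

-- B replaces A's single accumulating scan by two stages: a tokenizer producing an
-- intermediate token list and a renderer mapped over it, joined once (objective: alternative).

-- ===== PORT A =====
-- shared formatting helpers: Python's "%02X" and chr/str(int)
def pyHexU (n : Nat) : String := String.ofList ((Nat.toDigits 16 n).map Char.toUpper)
-- exact port of "%02X" % c : uppercase hex, zero-padded to width 2; a negative c prints as "-" ++ hex(|c|)
def pyHex02 (c : Int) : String :=
  if c < 0 then "-" ++ pyHexU (-c).toNat
  else (if (Nat.toDigits 16 c.toNat).length < 2 then "0" else "") ++ pyHexU c.toNat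

def createA_go (buf : List Int) : List Int → Nat → Nat → String → String
  | [], _, _, acc => acc
  | c :: rest, i, skip, acc =>
    if skip > 0 then createA_go buf rest (i+1) (skip-1) acc
    else if 0x20 ≤ c ∧ c ≤ 0x7F then
      createA_go buf rest (i+1) skip (acc ++ String.singleton (Char.ofNat c.toNat))
    else if c = 0x00 then createA_go buf rest (i+1) skip (acc ++ "<NOP />")
    else if c = 0xFC then
      if (PySem.List.pyGet? buf ((i : Int)+1)).getD 0 = 0 then
        createA_go buf rest (i+1) (skip+1) (acc ++ "<StartJustify />" ++ "<EndOfLine />\n")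
      else createA_go buf rest (i+1) skip (acc ++ "<StartJustify />")
    else if c = 0xFD then
      if (PySem.List.pyGet? buf ((i : Int)+1)).getD 0 = 0 then
        createA_go buf rest (i+1) (skip+1) (acc ++ "<CenterPreceeding />" ++ "<EndOfLine />\n")
      else createA_go buf rest (i+1) skip (acc ++ "<CenterPreceeding />")
    else if c = 0xF9 then
      createA_go buf rest (i+1) (skip+1)
        (acc ++ "<Font Style=\"" ++ PySem.Int.toStr ((PySem.List.pyGet? buf ((i : Int)+1)).getD 0) ++ "\">")
    else if c = 0xF6 then acc ++ "<EndOfPage />"   -- break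
    else createA_go buf rest (i+1) skip (acc ++ "<UNKNOWN: " ++ pyHex02 c ++ ">")

def create_markup (buf : List Int) : String :=
  createA_go buf buf 0 0 ("<Page RawSize=\"" ++ PySem.Int.toStr buf.length ++ "\">") ++ "</Page>"

-- ===== PORT B =====
-- intermediate token representation, the (kind, value) pairs of Source B's tokenizer
inductive Tok
  | txt : Int → Tok
  | nop : Tok
  | just : Bool → Tok
  | ctr : Bool → Tok
  | font : Int → Tok
  | eop : Tok
  | unk : Int → Tok
deriving DecidableEq, Repr

-- stage 1: tokenizer (port of Source B's _tokens generator)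
def tokenizeB (buf : List Int) (n : Nat) (i : Nat) : List Tok :=
  if _h : i < n then
    let c := (PySem.List.pyGet? buf (i : Int)).getD 0
    if 0x20 ≤ c ∧ c ≤ 0x7F then Tok.txt c :: tokenizeB buf n (i+1)
    else if c = 0x00 then Tok.nop :: tokenizeB buf n (i+1)
    else if c = 0xFC ∨ c = 0xFD then
      let eol := (PySem.List.pyGet? buf ((i : Int)+1)).getD 0 = 0
      (if c = 0xFC then Tok.just eol else Tok.ctr eol) ::
        tokenizeB buf n (if eol then i+2 else i+1)
    else if c = 0xF9 then
      Tok.font ((PySem.List.pyGet? buf ((i : Int)+1)).getD 0) :: tokenizeB buf n (i+2)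
    else if c = 0xF6 then [Tok.eop]
    else Tok.unk c :: tokenizeB buf n (i+1)
  else []
termination_by n - i
decreasing_by all_goals first | omega | (split <;> omega)

-- stage 2: renderer (port of Source B's _render)
def renderB : Tok → String
  | Tok.txt c => String.singleton (Char.ofNat c.toNat)
  | Tok.nop => "<NOP />"
  | Tok.just b => "<StartJustify />" ++ (if b then "<EndOfLine />\n" else "")
  | Tok.ctr b => "<CenterPreceeding />" ++ (if b then "<EndOfLine />\n" else "")
  | Tok.font v => "<Font Style=\"" ++ PySem.Int.toStr v ++ "\">"
  | Tok.eop => "<EndOfPage />"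
  | Tok.unk c => "<UNKNOWN: " ++ pyHex02 c ++ ">"

def create_markup_alt (buf : List Int) : String :=
  "<Page RawSize=\"" ++ PySem.Int.toStr buf.length ++ "\">" ++
    String.join ((tokenizeB buf buf.length 0).map renderB) ++ "</Page>"

-- ===== PRECONDITION & SPEC =====
-- Pre_ excludes buffers whose LAST byte is a tag byte (0xF9/0xFC/0xFD): reaching such a byte makes
-- A's (and B's) eager lookahead buf[i+1] raise IndexError; the exclusion is conservative (on a few
-- such buffers the trailing tag is skipped as a lookahead operand and both programs still agree).
def Pre_create_markup (buf : List Int) : Prop :=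
  buf.getLast?.all (fun c => decide (c ≠ 0xF9 ∧ c ≠ 0xFC ∧ c ≠ 0xFD)) = true
instance (buf : List Int) : Decidable (Pre_create_markup buf) := by unfold Pre_create_markup; infer_instance
def pvWitness_create_markup : List Int := [72, 249, 0, 105, 0]
def Spec_create_markup (buf : List Int) (out : String) : Prop := out = create_markup_alt buf
instance (buf : List Int) (out : String) : Decidable (Spec_create_markup buf out) := by unfold Spec_create_markup; infer_instance

-- ===== CLAIM (what is proved, stated in full; the proofs are below) =====
def Claim_equal_create_markup : Prop := ∀ (buf : List Int), Dom_create_markup buf → Pre_create_markup buf → Spec_create_markup buf (create_markup buf)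

-- ===== LEMMAS AND PROOFS =====

theorem foldl_append_str (l : List String) :
    ∀ s : String, l.foldl (fun r t => r ++ t) s = s ++ l.foldl (fun r t => r ++ t) "" := by
  induction l with
  | nil => simp
  | cons a t ih =>
    intro s
    simp only [List.foldl_cons]
    rw [ih ("" ++ a), ih (s ++ a)]
    simp [String.append_assoc]

theorem join_cons (s : String) (l : List String) :
    String.join (s :: l) = s ++ String.join l := by
  simp only [String.join, List.foldl_cons]
  rw [foldl_append_str]
  simp

theorem lastTag_absurd (buf : List Int) (hpre : Pre_create_markup buf) (i : Nat)
    (hi : i < buf.length) (hle : ¬ i + 1 < buf.length)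
    (htag : buf[i] = 0xF9 ∨ buf[i] = 0xFC ∨ buf[i] = 0xFD) : False := by
  have hie : buf.length - 1 = i := by omega
  have hlast : buf.getLast? = some buf[i] := by
    rw [List.getLast?_eq_getElem?, hie, List.getElem?_eq_getElem hi]
  unfold Pre_create_markup at hpre
  rw [hlast] at hpre
  rw [Option.all_some, decide_eq_true_iff] at hpre
  rcases htag with h | h | h <;> simp [h] at hpre

theorem key (buf : List Int) (hpre : Pre_create_markup buf) :
    ∀ k i acc, buf.length - i ≤ k →
      createA_go buf (buf.drop i) i 0 acc =
        acc ++ String.join ((tokenizeB buf buf.length i).map renderB) := by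
  intro k
  induction k with
  | zero =>
    intro i acc h
    have hi : buf.length ≤ i := by omega
    rw [List.drop_eq_nil_of_le hi, tokenizeB]
    simp [createA_go, Nat.not_lt.2 hi, String.join]
  | succ k ih =>
    intro i acc hk
    by_cases hi : i < buf.length
    · have hd : buf.drop i = buf[i] :: buf.drop (i+1) := List.drop_eq_getElem_cons hi
      have hc : (PySem.List.pyGet? buf (i : Int)).getD 0 = buf[i] := by
        rw [PySem.List.pyGet?_natCast]
        simp [List.getElem?_eq_getElem hi]
      rw [hd, tokenizeB]
      rw [dif_pos hi]
      simp only [hc, createA_go]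
      simp only [show ¬ (0:Nat) > 0 by omega, if_false]
      by_cases h1 : (0x20 : Int) ≤ buf[i] ∧ buf[i] ≤ 0x7F
      · simp only [if_pos h1, List.map_cons, join_cons, ih (i+1) _ (by omega), renderB,
          String.append_assoc]
      · simp only [if_neg h1]
        by_cases h2 : buf[i] = (0 : Int)
        · simp only [if_pos h2, List.map_cons, join_cons, ih (i+1) _ (by omega), renderB,
            String.append_assoc]
        · simp only [if_neg h2]
          by_cases h3 : buf[i] = (0xFC : Int)
          · have hlt : i + 1 < buf.length := by
              by_contra hle
              exact lastTag_absurd buf hpre i hi hle (Or.inr (Or.inl h3))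
            have hd2 : buf.drop (i+1) = buf[i+1] :: buf.drop (i+2) := List.drop_eq_getElem_cons hlt
            simp only [if_pos h3, if_pos (Or.inl h3)]
            by_cases hz : (PySem.List.pyGet? buf ((i : Int)+1)).getD 0 = 0
            · simp only [if_pos hz, hd2, createA_go, List.map_cons, join_cons, renderB]
              simp only [show (1:Nat) > 0 by omega, if_true]
              rw [show i + 1 + 1 = i + 2 by omega, ih (i+2) _ (by omega)]
              simp [hz, String.append_assoc]
            · simp only [if_neg hz, List.map_cons, join_cons, renderB,
                ih (i+1) _ (by omega)]
              simp [hz, String.append_assoc]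
          · simp only [if_neg h3]
            by_cases h4 : buf[i] = (0xFD : Int)
            · have hlt : i + 1 < buf.length := by
                by_contra hle
                exact lastTag_absurd buf hpre i hi hle (Or.inr (Or.inr h4))
              have hd2 : buf.drop (i+1) = buf[i+1] :: buf.drop (i+2) := List.drop_eq_getElem_cons hlt
              simp only [if_pos h4, if_pos (Or.inr h4)]
              by_cases hz : (PySem.List.pyGet? buf ((i : Int)+1)).getD 0 = 0
              · simp only [if_pos hz, hd2, createA_go, List.map_cons, join_cons, renderB]
                simp only [show (1:Nat) > 0 by omega, if_true]
                rw [show i + 1 + 1 = i + 2 by omega, ih (i+2) _ (by omega)]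
                simp [hz, String.append_assoc]
              · simp only [if_neg hz, List.map_cons, join_cons, renderB, ih (i+1) _ (by omega)]
                simp [hz, String.append_assoc]
            · simp only [if_neg h4, if_neg (show ¬ (buf[i] = (0xFC:Int) ∨ buf[i] = (0xFD:Int)) by tauto)]
              by_cases h5 : buf[i] = (0xF9 : Int)
              · have hlt : i + 1 < buf.length := by
                  by_contra hle
                  exact lastTag_absurd buf hpre i hi hle (Or.inl h5)
                have hd2 : buf.drop (i+1) = buf[i+1] :: buf.drop (i+2) := List.drop_eq_getElem_cons hlt
                simp only [if_pos h5, hd2, createA_go, List.map_cons, join_cons, renderB]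
                simp only [show (1:Nat) > 0 by omega, if_true]
                rw [show i + 1 + 1 = i + 2 by omega, ih (i+2) _ (by omega)]
                simp [String.append_assoc]
              · simp only [if_neg h5]
                by_cases h6 : buf[i] = (0xF6 : Int)
                · simp only [if_pos h6, List.map_cons, List.map_nil, join_cons, renderB]
                  simp [String.join]
                · simp only [if_neg h6, List.map_cons, join_cons, renderB, ih (i+1) _ (by omega),
                    String.append_assoc]
    · have hge : buf.length ≤ i := by omega
      rw [List.drop_eq_nil_of_le hge, tokenizeB]
      simp [createA_go, Nat.not_lt.2 hge, String.join]

-- ===== VERDICT (by name: the statement is the Claim_ definition above) =====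
theorem create_markup_spec : Claim_equal_create_markup := by
  intro buf _ hpre
  unfold Spec_create_markup create_markup create_markup_alt
  have h := key buf hpre buf.length 0 ("<Page RawSize=\"" ++ PySem.Int.toStr buf.length ++ "\">") (by omega)
  rw [List.drop_zero] at h
  rw [h, String.append_assoc]
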